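-- pv_equiv track=rewrite | github.com/HemprakashWadhai/BOT-Shreyasi-Python-Development-Intern-Skill-Evaluation | Q1.py | reverse_and_transform
-- ===== SOURCE A (Python) =====
-- def reverse_and_transform(s: str) -> str:
--     vowels = 'aeiouAEIOU'
--     reversed_transformed = []
--     length = 0
--
--     # Calculate the length of the string
--     for _ in s:
--         length += 1
--
--     # Iterate from the end to the start of the string
--     for i in range(length - 1, -1, -1):
--         char = s[i]
--         if char in vowels:
--             if 'a' <= char <= 'z':
--                 char = chr(ord(char) - 32)  # Convert to uppercase
--         else:
--             if 'A' <= char <= 'Z':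
--                 char = chr(ord(char) + 32)  # Convert to lowercase
--         reversed_transformed.append(char)
--
--     # Join the list into a string
--     transformed_string = ''
--     for char in reversed_transformed:
--         transformed_string += char
--
--     return transformed_string
-- ===== SOURCE B (Python) =====
-- _TABLE = str.maketrans('aeiouBCDFGHJKLMNPQRSTVWXYZ',
--                        'AEIOUbcdfghjklmnpqrstvwxyz')
--
-- def reverse_and_transform(s: str) -> str:
--     return s.translate(_TABLE)[::-1]
-- ===== Notes on version B (the rewrite author's own statement) =====
-- stated objective: faster
-- what changed: Replaces the manual length count, reverse-index loop with ord/chr branching, and char-by-char string concatenation by a precomputed str.maketrans table (lowercase vowels->upper, uppercase consonants->lower) applied in one str.translate pass followed by [::-1] reversal.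
import Mathlib
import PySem

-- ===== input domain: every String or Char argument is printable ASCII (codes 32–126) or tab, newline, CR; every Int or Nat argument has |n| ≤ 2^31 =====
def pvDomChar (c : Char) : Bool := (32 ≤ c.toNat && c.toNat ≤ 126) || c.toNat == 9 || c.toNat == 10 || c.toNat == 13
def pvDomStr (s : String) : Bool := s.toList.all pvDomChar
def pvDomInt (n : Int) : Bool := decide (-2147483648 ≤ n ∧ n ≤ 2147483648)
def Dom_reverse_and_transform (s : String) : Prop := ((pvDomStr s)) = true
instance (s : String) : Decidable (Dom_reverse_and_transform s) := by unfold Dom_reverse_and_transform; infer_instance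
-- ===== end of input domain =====

-- B replaces A's manual length count, reverse-index ord/chr loop and char-by-char
-- concatenation by a precomputed translation table applied in one pass, then a [::-1] reversal.

-- ===== PORT A =====
-- the per-character transformation of A's loop body (vowel test, then the two case branches)
def pvTransA (c : Char) : Char :=
  if c ∈ "aeiouAEIOU".toList then
    (if 'a' ≤ c ∧ c ≤ 'z' then Char.ofNat (c.toNat - 32) else c)
  else
    (if 'A' ≤ c ∧ c ≤ 'Z' then Char.ofNat (c.toNat + 32) else c)

-- string concatenation is modelled on List Char (String.ofList at the end); s[i] is
-- PySem.List.pyGetD on s.toList (the index is always in range here, so exact)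
def reverse_and_transform (s : String) : String :=
  let length : Int := s.toList.foldl (fun acc _ => acc + 1) 0
  let reversed_transformed : List Char :=
    (PySem.List.pyRange (length - 1) (-1) (-1)).foldl
      (fun acc i => acc ++ [pvTransA (PySem.List.pyGetD s.toList i ' ')]) []
  String.ofList (reversed_transformed.foldl (fun acc c => acc ++ [c]) [])

-- ===== PORT B =====
-- str.maketrans('aeiouBCDFGHJKLMNPQRSTVWXYZ', 'AEIOUbcdfghjklmnpqrstvwxyz')
def pvTable : PySem.Dict Char Char :=
  PySem.Dict.ofList (List.zip "aeiouBCDFGHJKLMNPQRSTVWXYZ".toList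
                              "AEIOUbcdfghjklmnpqrstvwxyz".toList)

-- s.translate(table)[::-1]
def reverse_and_transform_alt (s : String) : String :=
  (PySem.Str.slice? (String.ofList (s.toList.map (fun c => pvTable.getD c c))) none none (-1)).getD ""

-- ===== PRECONDITION & SPEC =====
def Spec_reverse_and_transform (s : String) (out : String) : Prop := out = reverse_and_transform_alt s
instance (s : String) (out : String) : Decidable (Spec_reverse_and_transform s out) := by unfold Spec_reverse_and_transform; infer_instance

-- ===== CLAIM (what is proved, stated in full; the proofs are below) =====
def Claim_equal_reverse_and_transform : Prop := ∀ (s : String), Dom_reverse_and_transform s → Spec_reverse_and_transform s (reverse_and_transform s)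

-- ===== LEMMAS AND PROOFS =====

-- the two per-character maps agree on every domain character (checked by enumeration ≤ 126)
set_option maxRecDepth 4000 in
theorem pvTrans_eq_table (c : Char) (h : pvDomChar c = true) :
    pvTransA c = pvTable.getD c c := by
  have hb : c.toNat < 127 := by
    simp [pvDomChar] at h; omega
  have hall : ∀ n < 127, pvTransA (Char.ofNat n) = pvTable.getD (Char.ofNat n) (Char.ofNat n) := by
    decide
  have := hall c.toNat hb
  rwa [Char.ofNat_toNat] at this

theorem pv_len_foldl (l : List Char) :
    l.foldl (fun acc _ => acc + 1) (0 : Int) = (l.length : Int) := by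
  have : ∀ (a : Int), l.foldl (fun acc _ => acc + 1) a = a + l.length := by
    induction l with
    | nil => simp
    | cons x xs ih => intro a; simp [List.foldl, ih]; omega
  simpa using this 0

theorem reverse_and_transform_spec : Claim_equal_reverse_and_transform := by
  intro s hdom
  unfold Spec_reverse_and_transform reverse_and_transform reverse_and_transform_alt
  rw [PySem.Str.slice?_none_none_neg_one]
  simp only [Option.getD_some]
  rw [pv_len_foldl]
  rw [PySem.List.pyRange_neg_one_eq_reverse]
  rw [PySem.List.foldl_append_singleton_eq_map, PySem.List.foldl_append_singleton_eq_map]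
  simp only [List.nil_append, List.map_reverse, List.map_id', String.toList_ofList]
  apply congrArg String.ofList
  apply congrArg List.reverse
  have hlen : ((s.toList.length : Int) - 1 + 1) = (s.toList.length : Int) := by omega
  rw [hlen]
  have h0 : (-1 : Int) + 1 = 0 := by omega
  rw [h0]
  rw [show (fun i => pvTransA (PySem.List.pyGetD s.toList i ' ')) =
        pvTransA ∘ (fun i => PySem.List.pyGetD s.toList i ' ') from rfl]
  rw [show ((s.toList.length : Int)) = PySem.List.len s.toList from rfl]
  rw [← List.map_map, PySem.List.map_pyGetD_pyRange_zero]
  have hall : ∀ c ∈ s.toList, pvDomChar c = true := by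
    simpa [Dom_reverse_and_transform, pvDomStr, List.all_eq_true] using hdom
  exact List.map_congr_left (fun c hc => pvTrans_eq_table c (hall c hc))
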